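-- pv_equiv track=rewrite | github.com/FundationOne/backtesting | pages/bank_sync.py | _sort_institutions
-- ===== SOURCE A (Python) =====
-- _DE_PRIORITY_KEYWORDS = [
--     "sparkasse", "volksbank", "raiffeisen", "commerzbank", "deutsche bank",
--     "ing", "dkb", "n26", "comdirect", "postbank", "hypovereinsbank",
--     "consorsbank", "targobank", "norisbank", "sparda", "apobank",
--     "psd bank", "santander", "revolut", "trade republic",
-- ]
--
-- def _sort_institutions(institutions, country):
--     """Sort institutions: popular banks first (for DE), then alphabetical."""
--     def _sort_key(inst):
--         name_lower = inst.get("name", "").lower()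
--         if (country or "").upper() == "DE":
--             for i, kw in enumerate(_DE_PRIORITY_KEYWORDS):
--                 if kw in name_lower:
--                     return (0, i, name_lower)
--         return (1, 0, name_lower)
--     return sorted(institutions, key=_sort_key)
-- ===== SOURCE B (Python) =====
-- _DE_PRIORITY_KEYWORDS = [
--     "sparkasse", "volksbank", "raiffeisen", "commerzbank", "deutsche bank",
--     "ing", "dkb", "n26", "comdirect", "postbank", "hypovereinsbank",
--     "consorsbank", "targobank", "norisbank", "sparda", "apobank",
--     "psd bank", "santander", "revolut", "trade republic",
-- ]
--
-- def _sort_institutions(institutions, country):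
--     """Partition into DE-priority banks (decorated with first keyword index) and the rest,
--     sort each part once, and concatenate."""
--     is_de = (country or "").upper() == "DE"
--     priority = []
--     rest = []
--     for inst in institutions:
--         name_lower = inst.get("name", "").lower()
--         idx = None
--         if is_de:
--             idx = next((i for i, kw in enumerate(_DE_PRIORITY_KEYWORDS) if kw in name_lower), None)
--         if idx is not None:
--             priority.append((idx, name_lower, inst))
--         else:
--             rest.append((name_lower, inst))
--     priority.sort(key=lambda t: (t[0], t[1]))
--     rest.sort(key=lambda t: t[0])
--     return [t[-1] for t in priority] + [t[-1] for t in rest]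
-- ===== Notes on version B (the rewrite author's own statement) =====
-- stated objective: alternative
-- what changed: B replaces A's single sort keyed by per-element tier tuples with one partitioning pass that splits institutions into a keyword-index-decorated priority list and a rest list, sorts each part separately (decorate-sort-undecorate), and concatenates them.
import Mathlib
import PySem

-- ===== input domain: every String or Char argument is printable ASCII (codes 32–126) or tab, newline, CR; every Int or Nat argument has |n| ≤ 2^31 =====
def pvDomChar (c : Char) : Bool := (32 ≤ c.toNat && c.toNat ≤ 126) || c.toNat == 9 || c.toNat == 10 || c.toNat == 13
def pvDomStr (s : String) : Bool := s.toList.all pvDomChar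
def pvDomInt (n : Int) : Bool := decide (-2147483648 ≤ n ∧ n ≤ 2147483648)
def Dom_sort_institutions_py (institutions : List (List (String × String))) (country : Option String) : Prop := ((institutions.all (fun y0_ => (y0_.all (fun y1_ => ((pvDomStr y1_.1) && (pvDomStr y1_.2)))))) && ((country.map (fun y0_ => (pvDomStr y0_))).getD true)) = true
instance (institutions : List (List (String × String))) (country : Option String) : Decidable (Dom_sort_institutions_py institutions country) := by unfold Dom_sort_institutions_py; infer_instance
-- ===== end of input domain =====

-- ===== PORT A =====
-- B changes the decomposition: one partitioning pass plus two smaller sorts instead of one keyed sort over tier tuples (objective: alternative).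
def pvDeKeywords : List String := [
  "sparkasse", "volksbank", "raiffeisen", "commerzbank", "deutsche bank",
  "ing", "dkb", "n26", "comdirect", "postbank", "hypovereinsbank",
  "consorsbank", "targobank", "norisbank", "sparda", "apobank",
  "psd bank", "santander", "revolut", "trade republic"]

-- inst.get("name", "").lower()  (shared by both ports: both Pythons use this very expression)
def pvNameLower (inst : List (String × String)) : String :=
  PySem.Str.lower ((PySem.Dict.mk inst).getD "name" "")

-- A's 'for i, kw in enumerate(...): if kw in name_lower: return (0, i, ...)' loop
def pvKwScan : List String → Int → String → Option Int
  | [], _, _ => none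
  | kw :: rest, i, nl => if PySem.Str.isIn kw nl then some i else pvKwScan rest (i + 1) nl

-- A's _sort_key returns a 3-tuple (tier, i, name_lower); Python compares tuples lexicographically
-- while Lean's Prod '<' is pointwise, so the (tier, i) prefix is encoded order-isomorphically as a
-- single Int — a match gives i ∈ [0,20), everything else gives 20 (> every i) — and sorted2 carries
-- name_lower as the second key component: exactly Python's ordering.
def pvKeyA (country : Option String) (inst : List (String × String)) : Int :=
  let nl := pvNameLower inst
  if PySem.Str.upper (country.getD "") == "DE" then
    match pvKwScan pvDeKeywords 0 nl with
    | some i => i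
    | none => 20
  else 20

def sort_institutions_py (institutions : List (List (String × String))) (country : Option String) : List (List (String × String)) :=
  PySem.List.sorted2 institutions (pvKeyA country) pvNameLower false

-- ===== PORT B =====
-- (country or "").upper() == "DE"
def pvIsDe (country : Option String) : Bool := PySem.Str.upper (country.getD "") == "DE"

-- next((i for i, kw in enumerate(_DE_PRIORITY_KEYWORDS) if kw in name_lower), None)
def pvFirstKw (nl : String) : Option Int :=
  ((PySem.List.enumerate pvDeKeywords 0).find? (fun q => PySem.Str.isIn q.2 nl)).map (fun q => q.1)

-- the body of B's partitioning loop
def pvStep (de : Bool)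
    (acc : List (Int × String × List (String × String)) × List (String × List (String × String)))
    (inst : List (String × String)) :
    List (Int × String × List (String × String)) × List (String × List (String × String)) :=
  let nl := pvNameLower inst
  match (if de then pvFirstKw nl else none) with
  | some i => (acc.1 ++ [(i, nl, inst)], acc.2)
  | none => (acc.1, acc.2 ++ [(nl, inst)])

def sort_institutions_py_alt (institutions : List (List (String × String))) (country : Option String) : List (List (String × String)) :=
  let pr := institutions.foldl (pvStep (pvIsDe country)) ([], [])
  (PySem.List.sorted2 pr.1 (fun t => t.1) (fun t => t.2.1) false).map (fun t => t.2.2)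
    ++ (PySem.List.sorted pr.2 (fun t => t.1) false).map (fun t => t.2)

-- ===== PRECONDITION & SPEC =====
def Spec_sort_institutions_py (institutions : List (List (String × String))) (country : Option String) (out : List (List (String × String))) : Prop := out = sort_institutions_py_alt institutions country
instance (institutions : List (List (String × String))) (country : Option String) (out : List (List (String × String))) : Decidable (Spec_sort_institutions_py institutions country out) := by unfold Spec_sort_institutions_py; infer_instance

-- ===== CLAIM (what is proved, stated in full; the proofs are below) =====
def Claim_equal_sort_institutions_py : Prop := ∀ (institutions : List (List (String × String))) (country : Option String), Dom_sort_institutions_py institutions country → Spec_sort_institutions_py institutions country (sort_institutions_py institutions country)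

-- ===== LEMMAS AND PROOFS =====

-- B's partition predicate and decorations (proof-side names for what B's loop does)
def pvP (country : Option String) (inst : List (String × String)) : Bool :=
  pvIsDe country && (pvFirstKw (pvNameLower inst)).isSome

def pvDec (inst : List (String × String)) : Int × String × List (String × String) :=
  ((pvFirstKw (pvNameLower inst)).getD 0, pvNameLower inst, inst)

def pvDec2 (inst : List (String × String)) : String × List (String × String) :=
  (pvNameLower inst, inst)

-- generic insertion-sort facts about PySem's stable sort --------------------------------------

theorem pvInsertBy_append_left {α : Type} (before : α → α → Bool) (x : α) (l1 l2 : List α)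
    (h : ∀ b ∈ l2, before x b = true) :
    PySem.List.insertBy before x (l1 ++ l2) = PySem.List.insertBy before x l1 ++ l2 := by
  induction l1 with
  | nil =>
    cases l2 with
    | nil => rfl
    | cons b t => simp [PySem.List.insertBy, h b (by simp)]
  | cons a t ih => by_cases hb : before x a = true <;> simp [PySem.List.insertBy, hb, ih]

theorem pvInsertBy_append_right {α : Type} (before : α → α → Bool) (x : α) (l1 l2 : List α)
    (h : ∀ b ∈ l1, before x b = false) :
    PySem.List.insertBy before x (l1 ++ l2) = l1 ++ PySem.List.insertBy before x l2 := by
  induction l1 with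
  | nil => rfl
  | cons a t ih =>
    have ha : before x a = false := h a (by simp)
    simp only [List.cons_append, PySem.List.insertBy, ha]
    simp [ih (fun b hb => h b (by simp [hb]))]

theorem pvInsertBy_congr {α : Type} (before before' : α → α → Bool) (x : α) (l : List α)
    (h : ∀ y ∈ l, before x y = before' x y) :
    PySem.List.insertBy before x l = PySem.List.insertBy before' x l := by
  induction l with
  | nil => rfl
  | cons a t ih =>
    have ha := h a (by simp)
    simp [PySem.List.insertBy, ← ha, ih (fun y hy => h y (by simp [hy]))]

theorem pvIsortSplitAux {α : Type} (before : α → α → Bool) (p : α → Bool)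
    (H1 : ∀ a b, p a = true → p b = false → before a b = true)
    (H2 : ∀ a b, p a = false → p b = true → before a b = false) :
    ∀ (l acc0 acc1 : List α), (∀ b ∈ acc0, p b = true) → (∀ b ∈ acc1, p b = false) →
    List.foldl (fun acc x => PySem.List.insertBy before x acc) (acc0 ++ acc1) l
      = List.foldl (fun acc x => PySem.List.insertBy before x acc) acc0 (l.filter p)
        ++ List.foldl (fun acc x => PySem.List.insertBy before x acc) acc1 (l.filter (fun x => !p x)) := by
  intro l
  induction l with
  | nil => intro acc0 acc1 _ _; simp
  | cons x t ih =>
    intro acc0 acc1 h0 h1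
    by_cases hx : p x = true
    · have hL : PySem.List.insertBy before x (acc0 ++ acc1)
          = PySem.List.insertBy before x acc0 ++ acc1 :=
        pvInsertBy_append_left _ _ _ _ (fun b hb => H1 x b hx (h1 b hb))
      have h0' : ∀ b ∈ PySem.List.insertBy before x acc0, p b = true := by
        intro b hb
        rcases (PySem.List.mem_insertBy _ _ _ _).mp hb with rfl | hb'
        · exact hx
        · exact h0 b hb'
      simp only [List.foldl_cons, hL, List.filter_cons, hx, Bool.not_true]
      simpa using ih (PySem.List.insertBy before x acc0) acc1 h0' h1
    · have hx' : p x = false := by simpa using hx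
      have hL : PySem.List.insertBy before x (acc0 ++ acc1)
          = acc0 ++ PySem.List.insertBy before x acc1 :=
        pvInsertBy_append_right _ _ _ _ (fun b hb => H2 x b hx' (h0 b hb))
      have h1' : ∀ b ∈ PySem.List.insertBy before x acc1, p b = false := by
        intro b hb
        rcases (PySem.List.mem_insertBy _ _ _ _).mp hb with rfl | hb'
        · exact hx'
        · exact h1 b hb'
      simp only [List.foldl_cons, hL, List.filter_cons, hx']
      simpa using ih acc0 (PySem.List.insertBy before x acc1) h0 h1'

theorem pvIsortCongrAux {α : Type} (before before' : α → α → Bool) :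
    ∀ (l acc : List α), (∀ a ∈ l, ∀ b, b ∈ acc ∨ b ∈ l → before a b = before' a b) →
    List.foldl (fun acc x => PySem.List.insertBy before x acc) acc l
      = List.foldl (fun acc x => PySem.List.insertBy before' x acc) acc l := by
  intro l
  induction l with
  | nil => intro _ _; rfl
  | cons x t ih =>
    intro acc H
    have hx : PySem.List.insertBy before x acc = PySem.List.insertBy before' x acc :=
      pvInsertBy_congr _ _ _ _ (fun y hy => H x (by simp) y (Or.inl hy))
    simp only [List.foldl_cons, hx]
    refine ih _ ?_
    intro a ha b hb
    refine H a (by simp [ha]) b ?_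
    rcases hb with hb | hb
    · rcases (PySem.List.mem_insertBy _ _ _ _).mp hb with rfl | hb'
      · exact Or.inr (by simp)
      · exact Or.inl hb'
    · exact Or.inr (by simp [hb])

theorem pvInsertBy_map {α β : Type} (before : β → β → Bool) (f : α → β) (x : α) (l : List α) :
    PySem.List.insertBy before (f x) (l.map f)
      = (PySem.List.insertBy (fun a b => before (f a) (f b)) x l).map f := by
  induction l with
  | nil => rfl
  | cons a t ih => by_cases hb : before (f x) (f a) = true <;> simp [PySem.List.insertBy, hb, ih]

theorem pvIsortMapAux {α β : Type} (before : β → β → Bool) (f : α → β) :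
    ∀ (l acc : List α),
    List.foldl (fun acc x => PySem.List.insertBy before x acc) (acc.map f) (l.map f)
      = (List.foldl (fun acc x => PySem.List.insertBy (fun a b => before (f a) (f b)) x acc) acc l).map f := by
  intro l
  induction l with
  | nil => intro acc; rfl
  | cons x t ih =>
    intro acc
    simp only [List.map_cons, List.foldl_cons, pvInsertBy_map]
    exact ih _

-- sorted / sorted2 as the insertBy fold
theorem pvSorted2_eq {α κ₁ κ₂ : Type} [LT κ₁] [DecidableLT κ₁] [LT κ₂] [DecidableLT κ₂]
    (xs : List α) (k1 : α → κ₁) (k2 : α → κ₂) :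
    PySem.List.sorted2 xs k1 k2 false
      = List.foldl (fun acc x => PySem.List.insertBy
          (fun a b => decide (k1 a < k1 b) || (!decide (k1 b < k1 a) && decide (k2 a < k2 b))) x acc) [] xs := rfl

theorem pvSorted_eq {α κ : Type} [LT κ] [DecidableLT κ] (xs : List α) (key : α → κ) :
    PySem.List.sorted xs key false
      = List.foldl (fun acc x => PySem.List.insertBy (fun a b => decide (key a < key b)) x acc) [] xs := rfl

-- facts about the keyword search -------------------------------------------------------------

theorem pvKwScan_eq_find (nl : String) :
    ∀ (l : List String) (i : Int), pvKwScan l i nl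
      = ((PySem.List.enumerate l i).find? (fun q => PySem.Str.isIn q.2 nl)).map (fun q => q.1) := by
  intro l
  induction l with
  | nil => intro i; rfl
  | cons kw t ih =>
    intro i
    simp only [pvKwScan, PySem.List.enumerate_cons, List.find?, PySem.Str.isIn]
    by_cases h : PySem.Chars.isIn kw.toList nl.toList = true
    · simp [h]
    · simp only [Bool.not_eq_true] at h
      simp [h, ih]

theorem pvFirstKw_lt (nl : String) (i : Int) (h : pvFirstKw nl = some i) : 0 ≤ i ∧ i < 20 := by
  unfold pvFirstKw at h
  rcases Option.map_eq_some_iff.mp h with ⟨q, hq, rfl⟩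
  have hmem : q ∈ PySem.List.enumerate pvDeKeywords 0 := List.mem_of_find?_eq_some hq
  rcases (PySem.List.mem_enumerate_iff _ _ _).mp hmem with ⟨k, hk, rfl⟩
  have hlen : pvDeKeywords.length = 20 := rfl
  refine ⟨by simp, by simp; omega⟩

-- A's key in terms of B's partition predicate
theorem pvKeyA_eq (country : Option String) (inst : List (String × String)) :
    pvKeyA country inst
      = if pvP country inst then (pvFirstKw (pvNameLower inst)).getD 0 else 20 := by
  unfold pvKeyA pvP pvIsDe
  have hscan : pvKwScan pvDeKeywords 0 (pvNameLower inst) = pvFirstKw (pvNameLower inst) := by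
    rw [pvKwScan_eq_find]; rfl
  by_cases hde : PySem.Str.upper (country.getD "") == "DE"
  · simp only [hde]
    rw [hscan]
    cases hfk : pvFirstKw (pvNameLower inst) <;> simp
  · simp [hde]

-- B's fold in filter/map form
theorem pvStep_foldl (de : Bool) :
    ∀ (l : List (List (String × String)))
      (acc : List (Int × String × List (String × String)) × List (String × List (String × String))),
    l.foldl (pvStep de) acc
      = (acc.1 ++ (l.filter (fun i => de && (pvFirstKw (pvNameLower i)).isSome)).map pvDec,
         acc.2 ++ (l.filter (fun i => !(de && (pvFirstKw (pvNameLower i)).isSome))).map pvDec2) := by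
  intro l
  induction l with
  | nil => intro acc; simp
  | cons x t ih =>
    intro acc
    simp only [List.foldl_cons, ih, List.filter_cons]
    cases hde : de with
    | false => simp [pvStep, pvDec2]
    | true =>
      cases hfk : pvFirstKw (pvNameLower x) with
      | none => simp [pvStep, hfk, pvDec2]
      | some i => simp [pvStep, hfk, pvDec]

theorem pvAlt_eq (institutions : List (List (String × String))) (country : Option String) :
    sort_institutions_py_alt institutions country
      = (PySem.List.sorted2 ((institutions.filter (pvP country)).map pvDec)
            (fun t => t.1) (fun t => t.2.1) false).map (fun t => t.2.2)
        ++ (PySem.List.sorted ((institutions.filter (fun i => !pvP country i)).map pvDec2)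
            (fun t => t.1) false).map (fun t => t.2) := by
  have hP : (fun i => pvIsDe country && (pvFirstKw (pvNameLower i)).isSome) = pvP country := by
    funext i; rfl
  have hP2 : (fun i => !(pvIsDe country && (pvFirstKw (pvNameLower i)).isSome))
      = (fun i => !pvP country i) := by funext i; rfl
  simp only [sort_institutions_py_alt, pvStep_foldl, hP, hP2]
  simp

-- sorting the decorated lists is sorting the undecorated ones by the decoration keys
theorem pvSorted2_map_dec (l : List (List (String × String))) :
    PySem.List.sorted2 (l.map pvDec) (fun t => t.1) (fun t => t.2.1) false
      = (PySem.List.sorted2 l (fun i => (pvFirstKw (pvNameLower i)).getD 0) pvNameLower false).map pvDec := by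
  rw [pvSorted2_eq, pvSorted2_eq]
  simpa [pvDec] using pvIsortMapAux
    (fun (a b : Int × String × List (String × String)) =>
      decide (a.1 < b.1) || (!decide (b.1 < a.1) && decide (a.2.1 < b.2.1))) pvDec l []

theorem pvSorted_map_dec2 (l : List (List (String × String))) :
    PySem.List.sorted (l.map pvDec2) (fun t => t.1) false
      = (PySem.List.sorted l pvNameLower false).map pvDec2 := by
  rw [pvSorted_eq, pvSorted_eq]
  simpa [pvDec2] using pvIsortMapAux
    (fun (a b : String × List (String × String)) => decide (a.1 < b.1)) pvDec2 l []

-- ===== VERDICT (by name: the statement is the Claim_ definition above) =====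
theorem sort_institutions_py_spec : Claim_equal_sort_institutions_py := by
  intro institutions country _
  unfold Spec_sort_institutions_py
  unfold sort_institutions_py
  have hlt20 : ∀ a, pvP country a = true → pvKeyA country a < 20 := by
    intro a ha
    rw [pvKeyA_eq, ha, if_pos rfl]
    have hs : (pvFirstKw (pvNameLower a)).isSome = true := by
      have h' := ha; unfold pvP at h'
      simp only [Bool.and_eq_true] at h'
      exact h'.2
    cases hfk : pvFirstKw (pvNameLower a) with
    | none => rw [hfk] at hs; simp at hs
    | some i => simpa [hfk] using (pvFirstKw_lt _ _ hfk).2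
  have heq20 : ∀ a, pvP country a = false → pvKeyA country a = 20 := by
    intro a ha; rw [pvKeyA_eq, ha]; simp
  have H1 : ∀ a b, pvP country a = true → pvP country b = false →
      (fun a b => decide (pvKeyA country a < pvKeyA country b)
        || (!decide (pvKeyA country b < pvKeyA country a)
            && decide (pvNameLower a < pvNameLower b))) a b = true := by
    intro a b ha hb
    have hka := hlt20 a ha
    have hkb := heq20 b hb
    simp [hkb, hka]
  have H2 : ∀ a b, pvP country a = false → pvP country b = true →
      (fun a b => decide (pvKeyA country a < pvKeyA country b)
        || (!decide (pvKeyA country b < pvKeyA country a)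
            && decide (pvNameLower a < pvNameLower b))) a b = false := by
    intro a b ha hb
    have hka := heq20 a ha
    have hkb := hlt20 b hb
    simp [hka]
    omega
  have hsplitS : PySem.List.sorted2 institutions (pvKeyA country) pvNameLower false
      = PySem.List.sorted2 (institutions.filter (pvP country)) (pvKeyA country) pvNameLower false
        ++ PySem.List.sorted2 (institutions.filter (fun i => !pvP country i)) (pvKeyA country) pvNameLower false := by
    rw [pvSorted2_eq, pvSorted2_eq, pvSorted2_eq]
    simpa using pvIsortSplitAux
      (fun a b => decide (pvKeyA country a < pvKeyA country b)
        || (!decide (pvKeyA country b < pvKeyA country a)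
            && decide (pvNameLower a < pvNameLower b)))
      (pvP country) H1 H2 institutions [] [] (by simp) (by simp)
  have hprio : PySem.List.sorted2 (institutions.filter (pvP country)) (pvKeyA country) pvNameLower false
      = PySem.List.sorted2 (institutions.filter (pvP country))
          (fun i => (pvFirstKw (pvNameLower i)).getD 0) pvNameLower false := by
    rw [pvSorted2_eq, pvSorted2_eq]
    exact pvIsortCongrAux _ _ _ _
      (by
        intro a ha b hb
        rcases hb with hb | hb
        · simp at hb
        · have hpa : pvP country a = true := List.of_mem_filter ha
          have hpb : pvP country b = true := List.of_mem_filter hb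
          have h1 : pvKeyA country a = (pvFirstKw (pvNameLower a)).getD 0 := by
            rw [pvKeyA_eq, hpa]; rfl
          have h2 : pvKeyA country b = (pvFirstKw (pvNameLower b)).getD 0 := by
            rw [pvKeyA_eq, hpb]; rfl
          simp [h1, h2])
  have hrest : PySem.List.sorted2 (institutions.filter (fun i => !pvP country i)) (pvKeyA country) pvNameLower false
      = PySem.List.sorted (institutions.filter (fun i => !pvP country i)) pvNameLower false := by
    rw [pvSorted2_eq, pvSorted_eq]
    exact pvIsortCongrAux _ _ _ _
      (by
        intro a ha b hb
        rcases hb with hb | hb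
        · simp at hb
        · have hpa : pvP country a = false := by simpa using List.of_mem_filter ha
          have hpb : pvP country b = false := by simpa using List.of_mem_filter hb
          have h1 := heq20 a hpa
          have h2 := heq20 b hpb
          simp [h1, h2])
  rw [pvAlt_eq, pvSorted2_map_dec, pvSorted_map_dec2, List.map_map, List.map_map]
  have e1 : ((fun t => t.2.2) ∘ pvDec : List (String × String) → List (String × String)) = id := rfl
  have e2 : ((fun t => t.2) ∘ pvDec2 : List (String × String) → List (String × String)) = id := rfl
  rw [e1, e2, List.map_id, List.map_id]
  rw [hsplitS, hprio, hrest]
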